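-- pv_equiv track=rewrite | github.com/AtmaBuster/pksuperbox | pokestr.py | dec2e
-- ===== SOURCE A (Python) =====
-- gen2e_map = \
-- 	'________________' +\
-- 	'_______________ ' +\
-- 	'________________' +\
-- 	'________________' +\
-- 	'______________ _' +\
-- 	'________________' +\
-- 	'________________' +\
-- 	'_______________ ' +\
-- 	'ABCDEFGHIJKLMNOP' +\
-- 	'QRSTUVWXYZ():;[]' +\
-- 	'abcdefghijklmnop' +\
-- 	'qrstuvwxyz______' +\
-- 	'ÄÖÜäöü__________' +\
-- 	'·¸¹º»¼½_1234567_' +\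
-- 	'\'´µ-__?!.&é____♂' +\
-- 	'¥¶_/,♀0123456789'
--
-- def dec2e(s):
-- 	so = ''
-- 	for c in s:
-- 		if c == 0x50:
-- 			break
-- 		cc = gen2e_map[c]
-- 		if cc == '_':
-- 			raise Exception(f'Decoding error : {c}, ${c:0>2X}')
-- 		so += cc
-- 	return so
-- ===== SOURCE B (Python) =====
-- gen2e_map = \
-- 	'________________' +\
-- 	'_______________ ' +\
-- 	'________________' +\
-- 	'________________' +\
-- 	'______________ _' +\
-- 	'________________' +\
-- 	'________________' +\
-- 	'_______________ ' +\
-- 	'ABCDEFGHIJKLMNOP' +\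
-- 	'QRSTUVWXYZ():;[]' +\
-- 	'abcdefghijklmnop' +\
-- 	'qrstuvwxyz______' +\
-- 	'ÄÖÜäöü__________' +\
-- 	'·¸¹º»¼½_1234567_' +\
-- 	'\'´µ-__?!.&é____♂' +\
-- 	'¥¶_/,♀0123456789'
--
-- # Decoding table built once: only the codes that decode to a real character.
-- _DEC = {i: ch for i, ch in enumerate(gen2e_map) if ch != '_'}
--
-- def dec2e(s):
-- 	if not s or s[0] == 0x50:
-- 		return ''
-- 	c = s[0]
-- 	k = c % 256
-- 	if k not in _DEC:
-- 		raise Exception(f'Decoding error : {c}, ${c:0>2X}')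
-- 	return _DEC[k] + dec2e(s[1:])
-- ===== Notes on version B (the rewrite author's own statement) =====
-- stated objective: alternative
-- what changed: Replaces A's iterative break-loop over the raw map string (per-byte string indexing, '_' sentinel test, string +=) by a module-level dict of only the valid codes (byte value mod 256) built once plus a structural recursion on the list (head decode + recursive call on the tail), so the sentinel check and map-string indexing disappear from the decode path.
import Mathlib
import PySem

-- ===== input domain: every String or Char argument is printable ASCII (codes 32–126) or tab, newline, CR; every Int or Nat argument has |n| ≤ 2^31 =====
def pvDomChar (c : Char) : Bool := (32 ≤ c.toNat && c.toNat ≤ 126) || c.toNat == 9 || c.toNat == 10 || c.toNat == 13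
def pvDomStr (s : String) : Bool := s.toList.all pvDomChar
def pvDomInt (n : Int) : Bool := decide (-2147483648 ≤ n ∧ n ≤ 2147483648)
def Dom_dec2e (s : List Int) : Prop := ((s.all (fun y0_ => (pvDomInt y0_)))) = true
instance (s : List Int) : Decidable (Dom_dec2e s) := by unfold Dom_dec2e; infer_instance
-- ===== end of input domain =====

-- B replaces A's interleaved loop over the raw map string (indexing + '_' sentinel test + string +=)
-- by a dict of valid codes built once and a recursive decode; return values agree on Pre_ (see Pre_'s note).

-- ===== PORT A =====
-- the Gen2 character map, as a list of characters (gen2e_map)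
def gen2eMap : List Char :=
  "_______________________________ ______________________________________________ ________________________________________________ ABCDEFGHIJKLMNOPQRSTUVWXYZ():;[]abcdefghijklmnopqrstuvwxyz______ÄÖÜäöü__________·¸¹º»¼½_1234567_'´µ-__?!.&é____♂¥¶_/,♀0123456789".toList

-- A's loop: for c in s: break on 0x50, look up gen2e_map[c], raise on '_', else append.
-- On the raise paths (IndexError / '_') Python raises; those inputs are outside Pre_, the port stops there.
def dec2eLoop (l : List Int) (so : String) : String :=
  match l with
  | [] => so
  | c :: rest =>
    if c = 80 then so
    else
      match PySem.List.pyGet? gen2eMap c with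
      | none => so            -- Python: IndexError (excluded by Pre_)
      | some cc =>
        if cc = '_' then so   -- Python: raise Exception (excluded by Pre_)
        else dec2eLoop rest (so ++ String.ofList [cc])

def dec2e (s : List Int) : String := dec2eLoop s ""

-- ===== PORT B =====
-- Source B's module-level table: {i: ch for i, ch in enumerate(gen2e_map) if ch != '_'}
def decDict : PySem.Dict Int Char :=
  (PySem.List.enumerate gen2eMap 0).foldl
    (fun d p => if p.2 ≠ '_' then d.insert p.1 p.2 else d) PySem.Dict.empty

-- Source B's recursion: empty / terminator → '', k = c % 256, missing key → raise (excluded by Pre_),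
-- else char + dec2e(s[1:])
def dec2e_alt (s : List Int) : String :=
  match s with
  | [] => ""
  | c :: rest =>
    if c = 80 then ""
    else
      match decDict.get? (PySem.Int.mod c 256) with
      | none => ""            -- Python: raise Exception (excluded by Pre_)
      | some cc => String.ofList [cc] ++ dec2e_alt rest

-- ===== PRECONDITION & SPEC =====
-- Pre_ excludes exactly the inputs on which A raises: a byte before the first 0x50 that is out of
-- gen2e_map's (negative-wrapping) index range, or one mapping to the '_' placeholder.
def Pre_dec2e (s : List Int) : Prop :=
  ∀ c ∈ s.takeWhile (fun c => c ≠ 80),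
    (PySem.List.pyGet? gen2eMap c).getD '_' ≠ '_'
instance (s : List Int) : Decidable (Pre_dec2e s) := by unfold Pre_dec2e; infer_instance
def pvWitness_dec2e : List Int := [80]

def Spec_dec2e (s : List Int) (out : String) : Prop := out = dec2e_alt s
instance (s : List Int) (out : String) : Decidable (Spec_dec2e s out) := by unfold Spec_dec2e; infer_instance

-- ===== CLAIM (what is proved, stated in full; the proofs are below) =====
def Claim_equal_dec2e : Prop := ∀ (s : List Int), Dom_dec2e s → Pre_dec2e s → Spec_dec2e s (dec2e s)

-- ===== LEMMAS AND PROOFS =====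

-- the character A's loop appends for a valid byte
def decOne (c : Int) : Char := (PySem.List.pyGet? gen2eMap c).getD '_'

-- the dict-building fold of Source B, over an arbitrary suffix (for the induction)
def buildD (l : List Char) (s : Int) (d : PySem.Dict Int Char) : PySem.Dict Int Char :=
  (PySem.List.enumerate l s).foldl
    (fun d p => if p.2 ≠ '_' then d.insert p.1 p.2 else d) d

lemma decDict_eq_buildD : decDict = buildD gen2eMap 0 PySem.Dict.empty := rfl

-- keys inserted by the fold are ≥ s: lookups below s are untouched
lemma buildD_get?_lt (l : List Char) (s : Int) (d : PySem.Dict Int Char)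
    (k : Int) (hk : k < s) : (buildD l s d).get? k = d.get? k := by
  induction l generalizing s d with
  | nil => simp [buildD, PySem.List.enumerate_nil]
  | cons x xs ih =>
    rw [show buildD (x :: xs) s d
        = buildD xs (s + 1) (if x ≠ '_' then d.insert s x else d) by
      simp [buildD, PySem.List.enumerate_cons]]
    rw [ih (s + 1) _ (by omega)]
    by_cases hx : x = '_'
    · simp [hx]
    · rw [if_pos hx, PySem.Dict.get?_insert, if_neg (show ¬ k = s by omega)]

-- the fold's lookup at key s + j is exactly the filtered map entry
lemma buildD_get? (l : List Char) (s : Int) (d : PySem.Dict Int Char)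
    (hd : ∀ k, s ≤ k → d.get? k = none) :
    ∀ (j : Nat) (h : j < l.length),
      (buildD l s d).get? (s + (j : Int))
        = if l[j] = '_' then none else some l[j] := by
  induction l generalizing s d with
  | nil => intro j h; simp at h
  | cons x xs ih =>
    intro j h
    rw [show buildD (x :: xs) s d
        = buildD xs (s + 1) (if x ≠ '_' then d.insert s x else d) by
      simp [buildD, PySem.List.enumerate_cons]]
    cases j with
    | zero =>
      rw [show s + ((0 : Nat) : Int) = s by omega]
      rw [buildD_get?_lt xs (s + 1) _ s (by omega)]
      by_cases hx : x = '_'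
      · simp [hx, hd s le_rfl]
      · simp [hx, PySem.Dict.get?_insert_self]
    | succ j =>
      have hd' : ∀ k, s + 1 ≤ k →
          (if x ≠ '_' then d.insert s x else d).get? k = none := by
        intro k hk
        by_cases hx : x = '_'
        · simp [hx, hd k (by omega)]
        · rw [if_pos hx, PySem.Dict.get?_insert, if_neg (show ¬ k = s by omega)]
          exact hd k (by omega)
      have := ih (s + 1) _ hd' j (by simpa using Nat.lt_of_succ_lt_succ h)
      rw [show s + ((j + 1 : Nat) : Int) = (s + 1) + (j : Int) by push_cast; ring]
      simpa using this

-- for a valid byte (possibly negative: Python wraps, Source B takes c % 256),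
-- Source B's dict lookup returns exactly A's mapped character
set_option maxRecDepth 8192 in
lemma decDict_get?_valid (c : Int)
    (hv : (PySem.List.pyGet? gen2eMap c).getD '_' ≠ '_') :
    decDict.get? (PySem.Int.mod c 256) = some (decOne c) := by
  have hL : gen2eMap.length = 256 := by rfl
  have hrange : -256 ≤ c ∧ c < 256 := by
    by_contra hout
    have : PySem.List.pyGet? gen2eMap c = none := by
      rw [PySem.List.pyGet?_eq_none_iff]
      simp only [PySem.Raise.InRange, hL]
      push_cast
      omega
    simp [this] at hv
  have hmod : PySem.Int.mod c 256 = c % 256 :=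
    PySem.Int.mod_eq_emod_of_pos (by omega)
  -- the index A's wraparound reads: c itself if nonnegative, else c + 256
  have hget : ∃ (j : Nat), j < 256 ∧ (PySem.Int.mod c 256) = (j : Int) ∧
      PySem.List.pyGet? gen2eMap c = gen2eMap[j]? := by
    by_cases h0 : 0 ≤ c
    · refine ⟨c.toNat, by omega, by rw [hmod]; omega, ?_⟩
      exact PySem.List.pyGet?_of_nonneg gen2eMap h0
    · refine ⟨(c + 256).toNat, by omega, by rw [hmod]; omega, ?_⟩
      have hc : c = -(((-c).toNat : Nat) : Int) := by omega
      rw [hc, PySem.List.pyGet?_neg_natCast gen2eMap (-c).toNat (by omega) (by omega)]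
      congr 1
      omega
  obtain ⟨j, hj, hmj, hgj⟩ := hget
  have hjL : j < gen2eMap.length := by omega
  have hsome : PySem.List.pyGet? gen2eMap c = some (gen2eMap[j]'hjL) := by
    rw [hgj]; exact List.getElem?_eq_getElem hjL
  have hne : gen2eMap[j]'hjL ≠ '_' := by
    intro hEq; apply hv; simp [hsome, hEq]
  rw [decDict_eq_buildD, hmj]
  have := buildD_get? gen2eMap 0 PySem.Dict.empty
    (by intro k _; simp [PySem.Dict.get?_empty]) j hjL
  rw [show (0 : Int) + (j : Int) = (j : Int) by omega] at this
  rw [this]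
  simp [hne, decOne, hsome]

-- A's loop invariant: under Pre_ on the remaining list, the loop appends the translated prefix.
lemma dec2eLoop_eq (l : List Int) (so : String)
    (h : ∀ c ∈ l.takeWhile (fun c => c ≠ 80), (PySem.List.pyGet? gen2eMap c).getD '_' ≠ '_') :
    dec2eLoop l so = so ++ String.ofList ((l.takeWhile (fun c => c ≠ 80)).map decOne) := by
  induction l generalizing so with
  | nil => simp [dec2eLoop]
  | cons c rest ih =>
    by_cases hc : c = 80
    · subst hc; simp [dec2eLoop, List.takeWhile]
    · have hmem : c ∈ (c :: rest).takeWhile (fun c => c ≠ 80) := by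
        simp [List.takeWhile, hc]
      have hne := h c hmem
      cases hg : PySem.List.pyGet? gen2eMap c with
      | none => exact (hne (by simp [hg])).elim
      | some cc =>
        have hcc : cc ≠ '_' := by simpa [hg, Option.getD] using hne
        have hrest : ∀ x ∈ rest.takeWhile (fun c => c ≠ 80),
            (PySem.List.pyGet? gen2eMap x).getD '_' ≠ '_' := by
          intro x hx
          exact h x (by
            simp only [List.takeWhile_cons]
            simp only [decide_not]
            simp only [show (decide (c = 80)) = false by simp [hc], Bool.not_false, if_true]
            exact List.mem_cons_of_mem _ (by simpa using hx))
        rw [show dec2eLoop (c :: rest) so = dec2eLoop rest (so ++ String.ofList [cc]) by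
          simp [dec2eLoop, hc, hg, hcc]]
        rw [ih _ hrest]
        simp [List.takeWhile, hc, decOne, hg, Option.getD, ← String.ofList_append,
          String.append_assoc]

-- B's recursion also produces the translated prefix, via the dict lookups.
lemma dec2e_alt_eq (l : List Int)
    (h : ∀ c ∈ l.takeWhile (fun c => c ≠ 80),
      (PySem.List.pyGet? gen2eMap c).getD '_' ≠ '_') :
    dec2e_alt l = String.ofList ((l.takeWhile (fun c => c ≠ 80)).map decOne) := by
  induction l with
  | nil => rfl
  | cons c rest ih =>
    by_cases hc : c = 80
    · subst hc
      rw [show dec2e_alt (80 :: rest) = if (80 : Int) = 80 then "" else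
          (match decDict.get? (PySem.Int.mod 80 256) with
            | none => "" | some cc => String.ofList [cc] ++ dec2e_alt rest) from rfl]
      simp [List.takeWhile]
    · have hmem : c ∈ (c :: rest).takeWhile (fun c => c ≠ 80) := by
        simp [List.takeWhile, hc]
      have hget := decDict_get?_valid c (h c hmem)
      have hrest : ∀ x ∈ rest.takeWhile (fun c => c ≠ 80),
          (PySem.List.pyGet? gen2eMap x).getD '_' ≠ '_' := by
        intro x hx
        exact h x (by
          simp only [List.takeWhile_cons]
          simp only [decide_not]
          simp only [show (decide (c = 80)) = false by simp [hc], Bool.not_false, if_true]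
          exact List.mem_cons_of_mem _ (by simpa using hx))
      rw [show dec2e_alt (c :: rest) = if c = 80 then "" else
          (match decDict.get? (PySem.Int.mod c 256) with
            | none => "" | some cc => String.ofList [cc] ++ dec2e_alt rest) from rfl]
      rw [if_neg hc, hget, ih hrest]
      simp [List.takeWhile, hc, ← String.ofList_append]

-- ===== VERDICT (by name: the statement is the Claim_ definition above) =====
theorem dec2e_spec : Claim_equal_dec2e := by
  intro s _ hpre
  unfold Spec_dec2e dec2e
  rw [dec2eLoop_eq s "" hpre, dec2e_alt_eq s hpre]
  simp
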